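-- pv_equiv track=rewrite | github.com/james5635/GeekForGeek-Data-Structure-and-Algorithm | array/bit_manipulation/solution.py | find_duplicates_bitmask
-- ===== SOURCE A (Python) =====
-- from typing import List, Tuple, Set
--
-- def find_duplicates_bitmask(arr: List[int]) -> Set[int]:
--     """
--     Find duplicates in array using bit manipulation (for small integers).
--     Works for integers in range 0-63.
--     """
--     seen = 0
--     duplicates = set()
--
--     for num in arr:
--         if 0 <= num < 64:
--             if seen & (1 << num):
--                 duplicates.add(num)
--             else:
--                 seen |= 1 << num
--
--     return duplicates
-- ===== SOURCE B (Python) =====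
-- from typing import List, Set
--
-- def find_duplicates_bitmask(arr: List[int]) -> Set[int]:
--     """
--     Find duplicates among the in-range (0-63) integers, declaratively:
--     keep the in-range values, then take every value that already occurred
--     earlier in that filtered list.
--     """
--     small = [x for x in arr if 0 <= x < 64]
--     return {x for i, x in enumerate(small) if x in small[:i]}
-- ===== Notes on version B (the rewrite author's own statement) =====
-- stated objective: simpler
-- what changed: Replaces the stateful single pass that maintains a 64-bit seen-bitmask and a growing duplicate set with a declarative two-phase form: filter to the 0-63 values, then one comprehension keeping each value that occurs earlier in the filtered prefix.
import Mathlib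
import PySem

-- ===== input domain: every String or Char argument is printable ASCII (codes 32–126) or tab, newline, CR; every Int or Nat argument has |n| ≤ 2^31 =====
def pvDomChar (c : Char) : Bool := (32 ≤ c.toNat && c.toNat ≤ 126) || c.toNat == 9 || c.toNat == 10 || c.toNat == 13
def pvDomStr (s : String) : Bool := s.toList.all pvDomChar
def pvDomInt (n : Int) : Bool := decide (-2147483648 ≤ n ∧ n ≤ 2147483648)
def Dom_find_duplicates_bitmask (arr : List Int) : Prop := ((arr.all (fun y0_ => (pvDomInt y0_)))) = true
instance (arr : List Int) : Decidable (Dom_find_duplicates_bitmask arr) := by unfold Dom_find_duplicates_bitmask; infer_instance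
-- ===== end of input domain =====

-- B replaces A's stateful seen-bitmask pass by a declarative filter-then-comprehension
-- over earlier occurrences (objective: simpler; not faster).

-- ===== PORT A =====
-- literal port: state (seen, duplicates); '1 << num' is pvBit num = (1 : Int) <<< num.toNat,
-- exact because the enclosing branches guarantee 0 ≤ num.
def pvBit (num : Int) : Int := (1 : Int) <<< num.toNat

def find_duplicates_bitmask (arr : List Int) : List Int :=
  (arr.foldl
    (fun (st : Int × PySem.Set Int) num =>
      if 0 ≤ num ∧ num < 64 then
        if PySem.Int.band st.1 (pvBit num) ≠ 0 then
          (st.1, PySem.Set.add st.2 num)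
        else
          (PySem.Int.bor st.1 (pvBit num), st.2)
      else st)
    (0, PySem.Set.empty)).2

-- ===== PORT B =====
def find_duplicates_bitmask_alt (arr : List Int) : List Int :=
  let small := arr.filter (fun x => decide (0 ≤ x ∧ x < 64))
  PySem.Set.ofList ((PySem.List.enumerate small 0).filterMap
    (fun p => if p.2 ∈ PySem.List.slice small none (some p.1) then some p.2 else none))

-- ===== PRECONDITION & SPEC =====
def Spec_find_duplicates_bitmask (arr : List Int) (out : List Int) : Prop := out = find_duplicates_bitmask_alt arr
instance (arr : List Int) (out : List Int) : Decidable (Spec_find_duplicates_bitmask arr out) := by unfold Spec_find_duplicates_bitmask; infer_instance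

-- ===== CLAIM (what is proved, stated in full; the proofs are below) =====
def Claim_equal_find_duplicates_bitmask : Prop := ∀ (arr : List Int), Dom_find_duplicates_bitmask arr → Spec_find_duplicates_bitmask arr (find_duplicates_bitmask arr)

-- ===== LEMMAS AND PROOFS =====

-- bitmask of a list of (nonnegative) ints, as a Nat
def pvMask (l : List Int) : Nat := l.foldl (fun m x => m ||| (1 <<< x.toNat)) 0

-- duplicate events of r relative to the already-seen prefix pre, in order
def pvDups (pre : List Int) : List Int → List Int
  | [] => []
  | x :: r => if x ∈ pre then x :: pvDups (pre ++ [x]) r else pvDups (pre ++ [x]) r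

theorem pv_shift_cast (k : Nat) : (1 : Int) <<< k = ((1 <<< k : Nat) : Int) := by
  simp [Int.shiftLeft_eq]

theorem pv_testBit_foldl (l : List Int) : ∀ (m k : Nat),
    ((l.foldl (fun m x => m ||| (1 <<< x.toNat)) m).testBit k)
      = (m.testBit k || l.any (fun x => x.toNat == k)) := by
  induction l with
  | nil => simp
  | cons x r ih =>
      intro m k
      simp only [List.foldl_cons, List.any_cons, ih]
      simp only [Nat.testBit_or, Nat.one_shiftLeft, Nat.testBit_two_pow, Bool.or_assoc]
      rcases eq_or_ne x.toNat k with h | h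
      · simp [h]
      · have h1 : (x.toNat == k) = false := by simpa using h
        have h2 : decide (x.toNat = k) = false := by simpa using h
        simp [h1, h2]

theorem pv_mask_testBit (l : List Int) (k : Nat) :
    (pvMask l).testBit k = l.any (fun x => x.toNat == k) := by
  simpa using pv_testBit_foldl l 0 k

theorem pv_or_self (m k : Nat) (h : m.testBit k = true) : m ||| (1 <<< k) = m := by
  apply Nat.eq_of_testBit_eq
  intro i
  simp only [Nat.testBit_or, Nat.one_shiftLeft, Nat.testBit_two_pow]
  by_cases hik : k = i
  · subst hik; simp [h]
  · simp [hik]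

theorem pv_mask_append (pre : List Int) (x : Int) :
    pvMask (pre ++ [x]) = pvMask pre ||| (1 <<< x.toNat) := by
  simp [pvMask, List.foldl_append]

theorem pv_any_eq_mem (pre : List Int) (x : Int) (hx : 0 ≤ x)
    (hpre : ∀ y ∈ pre, 0 ≤ y) :
    (pre.any (fun y => y.toNat == x.toNat) = true) ↔ x ∈ pre := by
  simp only [List.any_eq_true, beq_iff_eq]
  constructor
  · rintro ⟨y, hy, he⟩
    have := hpre y hy
    have : y = x := by omega
    simpa [this] using hy
  · intro hmem; exact ⟨x, hmem, rfl⟩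

theorem pv_band_ne_zero (m : Nat) (x : Int) :
    (PySem.Int.band (m : Int) (pvBit x) ≠ 0) ↔ m.testBit x.toNat = true := by
  rw [pvBit, pv_shift_cast]
  simp only [PySem.Int.band_natCast, ne_eq, Nat.cast_eq_zero, Nat.one_shiftLeft,
    Nat.and_two_pow]
  cases h : m.testBit x.toNat
  · simp
  · simp

theorem pv_A_loop (rest : List Int) : ∀ (pre : List Int) (d : PySem.Set Int),
    (∀ y ∈ pre, 0 ≤ y) →
    (rest.foldl
      (fun (st : Int × PySem.Set Int) num =>
        if 0 ≤ num ∧ num < 64 then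
          if PySem.Int.band st.1 (pvBit num) ≠ 0 then
            (st.1, PySem.Set.add st.2 num)
          else
            (PySem.Int.bor st.1 (pvBit num), st.2)
        else st)
      (((pvMask pre : Nat) : Int), d)).2
      = PySem.Set.update d (pvDups pre (rest.filter (fun x => decide (0 ≤ x ∧ x < 64)))) := by
  induction rest with
  | nil => intro pre d hpre; simp [pvDups, PySem.Set.update]
  | cons x r ih =>
      intro pre d hpre
      simp only [List.foldl_cons, List.filter_cons]
      by_cases h64 : 0 ≤ x ∧ x < 64
      · rw [if_pos h64]
        simp only [h64, decide_true, and_self, if_true]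
        have hbit : (PySem.Int.band ((pvMask pre : Nat) : Int) (pvBit x) ≠ 0) ↔ x ∈ pre := by
          rw [pv_band_ne_zero, pv_mask_testBit]
          exact pv_any_eq_mem pre x h64.1 hpre
        by_cases hmem : x ∈ pre
        · rw [if_pos (hbit.mpr hmem)]
          have hmask : pvMask (pre ++ [x]) = pvMask pre := by
            rw [pv_mask_append]
            apply pv_or_self
            rw [pv_mask_testBit]
            exact (pv_any_eq_mem pre x h64.1 hpre).mpr hmem
          have := ih (pre ++ [x]) (PySem.Set.add d x)
            (by intro y hy; rcases List.mem_append.mp hy with h | h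
                · exact hpre y h
                · simp at h; omega)
          rw [hmask] at this
          rw [this]
          simp [pvDups, hmem, PySem.Set.update]
        · rw [if_neg (fun hc => hmem (hbit.mp hc))]
          have hcast : PySem.Int.bor ((pvMask pre : Nat) : Int) (pvBit x)
              = ((pvMask (pre ++ [x]) : Nat) : Int) := by
            rw [pvBit, pv_shift_cast, PySem.Int.bor_natCast, pv_mask_append]
          rw [hcast]
          rw [ih (pre ++ [x]) d
            (by intro y hy; rcases List.mem_append.mp hy with h | h
                · exact hpre y h
                · simp at h; omega)]
          simp [pvDups, hmem]
      · rw [if_neg h64]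
        simp only [h64, decide_false, Bool.false_eq_true, if_false]
        exact ih pre d hpre

theorem pv_B_shape (r : List Int) : ∀ (pre : List Int),
    (PySem.List.enumerate r ((pre.length : Nat) : Int)).filterMap
      (fun p => if p.2 ∈ PySem.List.slice (pre ++ r) none (some p.1) then some p.2 else none)
      = pvDups pre r := by
  induction r with
  | nil => intro pre; simp [PySem.List.enumerate, pvDups]
  | cons x r ih =>
      intro pre
      rw [PySem.List.enumerate_cons, List.filterMap_cons]
      have hsl : PySem.List.slice (pre ++ x :: r) none (some ((pre.length : Nat) : Int))
          = pre := by
        rw [PySem.List.slice_to_natCast]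
        exact List.take_left
      simp only [hsl]
      have hrw : pre ++ x :: r = (pre ++ [x]) ++ r := by simp
      have hs : ((pre.length : Nat) : Int) + 1 = (((pre ++ [x]).length : Nat) : Int) := by
        simp
      rw [hrw, hs, ih (pre ++ [x])]
      by_cases hmem : x ∈ pre <;> simp [pvDups, hmem]

-- ===== VERDICT (by name: the statement is the Claim_ definition above) =====
theorem find_duplicates_bitmask_spec : Claim_equal_find_duplicates_bitmask := by
  intro arr _
  unfold Spec_find_duplicates_bitmask find_duplicates_bitmask find_duplicates_bitmask_alt
  have hA := pv_A_loop arr [] PySem.Set.empty (by intro y hy; simp at hy)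
  simp only [pvMask, List.foldl_nil, Nat.cast_zero] at hA
  rw [hA]
  have hB := pv_B_shape (arr.filter (fun x => decide (0 ≤ x ∧ x < 64))) []
  simp only [List.length_nil, Nat.cast_zero, List.nil_append] at hB
  rw [← hB]
  exact PySem.Set.update_nil_left _
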